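-- pv_equiv track=rewrite | github.com/bouyang/pythonCSP | DSA_book/20_chapter.py | prob4
-- ===== SOURCE A (Python) =====
-- def prob4(arr):
--     highest_positive = [0, 0]
--     highest_negative = [0, 0]
--
--     for num in arr:
--         if num > 0:
--             if num > min(highest_positive):
--                 highest_positive = [max(highest_positive), num]
--         if num < 0:
--             if num < max(highest_negative):
--                 highest_negative = [min(highest_negative), num]
--
--     return max(highest_positive[0] * highest_positive[1], highest_negative[0] * highest_negative[1])
-- ===== SOURCE B (Python) =====
-- def prob4(arr):
--     pos = sorted((x for x in arr if x > 0), reverse=True)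
--     neg = sorted(x for x in arr if x < 0)
--     p = pos[0] * pos[1] if len(pos) >= 2 else 0
--     n = neg[0] * neg[1] if len(neg) >= 2 else 0
--     return max(p, n)
-- ===== Notes on version B (the rewrite author's own statement) =====
-- stated objective: simpler
-- what changed: Replaces A's online top-two/bottom-two pair tracking (mutable two-element lists updated with min/max inside one loop) by filtering each sign, sorting, and multiplying the top pair of each sorted list, with 0 when a sign has fewer than two elements.
import Mathlib
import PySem

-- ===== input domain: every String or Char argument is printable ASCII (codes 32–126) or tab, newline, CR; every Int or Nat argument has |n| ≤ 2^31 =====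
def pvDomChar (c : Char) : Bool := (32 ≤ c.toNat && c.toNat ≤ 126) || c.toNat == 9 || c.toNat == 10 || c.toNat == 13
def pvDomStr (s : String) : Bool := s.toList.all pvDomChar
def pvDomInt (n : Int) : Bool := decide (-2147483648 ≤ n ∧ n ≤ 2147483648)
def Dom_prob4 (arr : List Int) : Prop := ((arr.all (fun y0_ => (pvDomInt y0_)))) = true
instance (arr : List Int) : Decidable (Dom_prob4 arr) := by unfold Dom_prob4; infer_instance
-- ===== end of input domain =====

-- B replaces A's one-pass top-two/bottom-two pair tracking by sort-each-sign and take the top pair; objective: simpler.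

-- ===== PORT A =====
-- loop body for highest_positive: if num > 0 and num > min(hp): hp = [max(hp), num]
def posUpd (hp : Int × Int) (num : Int) : Int × Int :=
  if 0 < num then (if min hp.1 hp.2 < num then (max hp.1 hp.2, num) else hp) else hp

-- loop body for highest_negative: if num < 0 and num < max(hn): hn = [min(hn), num]
def negUpd (hn : Int × Int) (num : Int) : Int × Int :=
  if num < 0 then (if num < max hn.1 hn.2 then (min hn.1 hn.2, num) else hn) else hn

def prob4 (arr : List Int) : Int :=
  let s := arr.foldl (fun st num => (posUpd st.1 num, negUpd st.2 num)) ((0, 0), (0, 0))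
  max (s.1.1 * s.1.2) (s.2.1 * s.2.2)

-- ===== PORT B =====
def prob4_alt (arr : List Int) : Int :=
  let pos := PySem.List.sorted (arr.filter (fun x => decide (0 < x))) (fun x => x) true
  let neg := PySem.List.sorted (arr.filter (fun x => decide (x < 0))) (fun x => x) false
  let p := if 2 ≤ pos.length then pos.getD 0 0 * pos.getD 1 0 else 0
  let n := if 2 ≤ neg.length then neg.getD 0 0 * neg.getD 1 0 else 0
  max p n

-- ===== PRECONDITION & SPEC =====
def Spec_prob4 (arr : List Int) (out : Int) : Prop := out = prob4_alt arr
instance (arr : List Int) (out : Int) : Decidable (Spec_prob4 arr out) := by unfold Spec_prob4; infer_instance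

-- ===== CLAIM (what is proved, stated in full; the proofs are below) =====
def Claim_equal_prob4 : Prop := ∀ (arr : List Int), Dom_prob4 arr → Spec_prob4 arr (prob4 arr)

-- ===== LEMMAS AND PROOFS =====

-- canonical top-two insertion on ordered pairs (fst ≥ snd when the invariant holds)
def stepP (p : Int × Int) (x : Int) : Int × Int :=
  if p.1 ≤ x then (x, p.1) else if p.2 < x then (p.1, x) else p

-- canonical bottom-two insertion on ordered pairs (fst ≤ snd when the invariant holds)
def stepN (p : Int × Int) (x : Int) : Int × Int :=
  if x ≤ p.1 then (x, p.1) else if x < p.2 then (p.1, x) else p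

lemma stepP_comm (s : Int × Int) (x y : Int) :
    stepP (stepP s x) y = stepP (stepP s y) x := by
  obtain ⟨a, b⟩ := s
  simp only [stepP]
  split_ifs <;> simp_all [Prod.mk.injEq] <;> omega

lemma stepN_comm (s : Int × Int) (x y : Int) :
    stepN (stepN s x) y = stepN (stepN s y) x := by
  obtain ⟨a, b⟩ := s
  simp only [stepN]
  split_ifs <;> simp_all [Prod.mk.injEq] <;> omega

lemma posUpd_step (a b x : Int) (hx : 0 < x) :
    (max (posUpd (a, b) x).1 (posUpd (a, b) x).2, min (posUpd (a, b) x).1 (posUpd (a, b) x).2)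
      = stepP (max a b, min a b) x := by
  simp only [posUpd, stepP, if_pos hx]
  split_ifs <;> simp only [Prod.mk.injEq] <;> omega

lemma negUpd_step (a b x : Int) (hx : x < 0) :
    (min (negUpd (a, b) x).1 (negUpd (a, b) x).2, max (negUpd (a, b) x).1 (negUpd (a, b) x).2)
      = stepN (min a b, max a b) x := by
  simp only [negUpd, stepN, if_pos hx]
  split_ifs <;> simp only [Prod.mk.injEq] <;> omega

lemma fold_posUpd (l : List Int) : ∀ a b : Int,
    (max (l.foldl posUpd (a, b)).1 (l.foldl posUpd (a, b)).2,
     min (l.foldl posUpd (a, b)).1 (l.foldl posUpd (a, b)).2)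
      = (l.filter (fun x => decide (0 < x))).foldl stepP (max a b, min a b) := by
  induction l with
  | nil => intro a b; rfl
  | cons x l ih =>
    intro a b
    by_cases hx : 0 < x
    · have h1 : posUpd (a, b) x = ((posUpd (a, b) x).1, (posUpd (a, b) x).2) := rfl
      simp only [List.foldl_cons, List.filter_cons, hx, decide_true, if_true]
      rw [h1, ih, ← posUpd_step a b x hx]
    · have h0 : posUpd (a, b) x = (a, b) := by simp [posUpd, hx]
      simp [hx, h0, ih]

lemma fold_negUpd (l : List Int) : ∀ a b : Int,
    (min (l.foldl negUpd (a, b)).1 (l.foldl negUpd (a, b)).2,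
     max (l.foldl negUpd (a, b)).1 (l.foldl negUpd (a, b)).2)
      = (l.filter (fun x => decide (x < 0))).foldl stepN (min a b, max a b) := by
  induction l with
  | nil => intro a b; rfl
  | cons x l ih =>
    intro a b
    by_cases hx : x < 0
    · have h1 : negUpd (a, b) x = ((negUpd (a, b) x).1, (negUpd (a, b) x).2) := rfl
      simp only [List.foldl_cons, List.filter_cons, hx, decide_true, if_true]
      rw [h1, ih, ← negUpd_step a b x hx]
    · have h0 : negUpd (a, b) x = (a, b) := by simp [negUpd, hx]
      simp [hx, h0, ih]

lemma stepP_stay (l : List Int) (a b : Int) (hba : b ≤ a) (h : ∀ y ∈ l, y ≤ b) :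
    l.foldl stepP (a, b) = (a, b) := by
  induction l with
  | nil => rfl
  | cons x l ih =>
    have hx : x ≤ b := h x (by simp)
    have hst : stepP (a, b) x = (a, b) := by
      simp only [stepP]
      split_ifs <;> simp only [Prod.mk.injEq] <;> omega
    simp only [List.foldl_cons, hst]
    exact ih (fun y hy => h y (by simp [hy]))

lemma stepN_stay (l : List Int) (a b : Int) (hab : a ≤ b) (h : ∀ y ∈ l, b ≤ y) :
    l.foldl stepN (a, b) = (a, b) := by
  induction l with
  | nil => rfl
  | cons x l ih =>
    have hx : b ≤ x := h x (by simp)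
    have hst : stepN (a, b) x = (a, b) := by
      simp only [stepN]
      split_ifs <;> simp only [Prod.mk.injEq] <;> omega
    simp only [List.foldl_cons, hst]
    exact ih (fun y hy => h y (by simp [hy]))

lemma stepP_sorted (s : List Int) (hpos : ∀ y ∈ s, 0 < y)
    (hs : s.Pairwise (fun a b => b ≤ a)) :
    (s.foldl stepP (0, 0)).1 * (s.foldl stepP (0, 0)).2
      = if 2 ≤ s.length then s.getD 0 0 * s.getD 1 0 else 0 := by
  match s with
  | [] => rfl
  | [x] =>
    have hx : (0 : Int) < x := hpos x (by simp)
    simp only [List.foldl_cons, List.foldl_nil, stepP]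
    rw [if_pos (by omega : (0 : Int) ≤ x)]
    simp
  | x0 :: x1 :: rest =>
    have hx0 : (0 : Int) < x0 := hpos x0 (by simp)
    have hx1 : (0 : Int) < x1 := hpos x1 (by simp)
    have h10 : x1 ≤ x0 := (List.pairwise_cons.mp hs).1 x1 (by simp)
    have hrest : ∀ y ∈ rest, y ≤ x1 :=
      (List.pairwise_cons.mp (List.pairwise_cons.mp hs).2).1
    have hfold : (x0 :: x1 :: rest).foldl stepP (0, 0) = (max x0 x1, min x0 x1) := by
      simp only [List.foldl_cons, stepP]
      rw [if_pos (by omega : (0 : Int) ≤ x0)]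
      by_cases h01 : x0 ≤ x1
      · rw [if_pos h01]
        have := stepP_stay rest x1 x0 (by omega) (fun y hy => by have := hrest y hy; omega)
        rw [this]; simp only [Prod.mk.injEq]; omega
      · rw [if_neg h01, if_pos hx1]
        have := stepP_stay rest x0 x1 (by omega) hrest
        rw [this]; simp only [Prod.mk.injEq]; omega
    rw [hfold]
    simp only [List.length_cons, List.getD_cons_zero, List.getD_cons_succ]
    rw [if_pos (by omega)]
    rcases le_total x0 x1 with h | h
    · rw [max_eq_right h, min_eq_left h, mul_comm]
    · rw [max_eq_left h, min_eq_right h]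

lemma stepN_sorted (s : List Int) (hneg : ∀ y ∈ s, y < 0)
    (hs : s.Pairwise (fun a b => a ≤ b)) :
    (s.foldl stepN (0, 0)).1 * (s.foldl stepN (0, 0)).2
      = if 2 ≤ s.length then s.getD 0 0 * s.getD 1 0 else 0 := by
  match s with
  | [] => rfl
  | [x] =>
    have hx : x < (0 : Int) := hneg x (by simp)
    simp only [List.foldl_cons, List.foldl_nil, stepN]
    rw [if_pos (by omega : x ≤ (0 : Int))]
    simp
  | x0 :: x1 :: rest =>
    have hx0 : x0 < (0 : Int) := hneg x0 (by simp)
    have hx1 : x1 < (0 : Int) := hneg x1 (by simp)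
    have h01 : x0 ≤ x1 := (List.pairwise_cons.mp hs).1 x1 (by simp)
    have hrest : ∀ y ∈ rest, x1 ≤ y :=
      (List.pairwise_cons.mp (List.pairwise_cons.mp hs).2).1
    have hfold : (x0 :: x1 :: rest).foldl stepN (0, 0) = (min x0 x1, max x0 x1) := by
      simp only [List.foldl_cons, stepN]
      rw [if_pos (by omega : x0 ≤ (0 : Int))]
      by_cases h10 : x1 ≤ x0
      · rw [if_pos h10]
        have := stepN_stay rest x1 x0 (by omega) (fun y hy => by have := hrest y hy; omega)
        rw [this]; simp only [Prod.mk.injEq]; omega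
      · rw [if_neg h10, if_pos hx1]
        have := stepN_stay rest x0 x1 (by omega) hrest
        rw [this]; simp only [Prod.mk.injEq]; omega
    rw [hfold]
    simp only [List.length_cons, List.getD_cons_zero, List.getD_cons_succ]
    rw [if_pos (by omega)]
    rcases le_total x0 x1 with h | h
    · rw [min_eq_left h, max_eq_right h]
    · rw [min_eq_right h, max_eq_left h, mul_comm]

lemma mul_max_min (a b : Int) : a * b = max a b * min a b := by
  rcases le_total a b with h | h
  · rw [max_eq_right h, min_eq_left h, mul_comm]
  · rw [max_eq_left h, min_eq_right h]

lemma mul_min_max (a b : Int) : a * b = min a b * max a b := by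
  rcases le_total a b with h | h
  · rw [min_eq_left h, max_eq_right h]
  · rw [min_eq_right h, max_eq_left h, mul_comm]

lemma pos_side (arr : List Int) :
    (arr.foldl posUpd (0, 0)).1 * (arr.foldl posUpd (0, 0)).2
      = (if 2 ≤ (PySem.List.sorted (arr.filter (fun x => decide (0 < x))) (fun x => x) true).length
         then (PySem.List.sorted (arr.filter (fun x => decide (0 < x))) (fun x => x) true).getD 0 0
                * (PySem.List.sorted (arr.filter (fun x => decide (0 < x))) (fun x => x) true).getD 1 0
         else 0) := by
  set fl := arr.filter (fun x => decide (0 < x)) with hfl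
  set pos := PySem.List.sorted fl (fun x => x) true with hpos
  have hperm : pos.Perm fl := PySem.List.sorted_perm fl (fun x => x) true
  have hf := fold_posUpd arr 0 0
  simp only [max_self, min_self] at hf
  have h1 : max (arr.foldl posUpd (0, 0)).1 (arr.foldl posUpd (0, 0)).2
      = (fl.foldl stepP ((0 : Int), (0 : Int))).1 := by rw [← hf]
  have h2 : min (arr.foldl posUpd (0, 0)).1 (arr.foldl posUpd (0, 0)).2
      = (fl.foldl stepP ((0 : Int), (0 : Int))).2 := by rw [← hf]
  rw [mul_max_min, h1, h2]
  have hfold : fl.foldl stepP ((0 : Int), (0 : Int)) = pos.foldl stepP ((0 : Int), (0 : Int)) :=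
    (List.Perm.foldl_eq (rcomm := ⟨fun s x y => stepP_comm s x y⟩) hperm ((0 : Int), (0 : Int))).symm
  rw [hfold]
  exact stepP_sorted pos
    (fun y hy => by
      have hyfl : y ∈ fl := hperm.mem_iff.mp hy
      have := List.of_mem_filter hyfl
      simpa using this)
    (PySem.List.sorted_pairwise_rev fl (fun x => x))

lemma neg_side (arr : List Int) :
    (arr.foldl negUpd (0, 0)).1 * (arr.foldl negUpd (0, 0)).2
      = (if 2 ≤ (PySem.List.sorted (arr.filter (fun x => decide (x < 0))) (fun x => x) false).length
         then (PySem.List.sorted (arr.filter (fun x => decide (x < 0))) (fun x => x) false).getD 0 0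
                * (PySem.List.sorted (arr.filter (fun x => decide (x < 0))) (fun x => x) false).getD 1 0
         else 0) := by
  set fl := arr.filter (fun x => decide (x < 0)) with hfl
  set neg := PySem.List.sorted fl (fun x => x) false with hneg
  have hperm : neg.Perm fl := PySem.List.sorted_perm fl (fun x => x) false
  have hf := fold_negUpd arr 0 0
  simp only [max_self, min_self] at hf
  have h1 : min (arr.foldl negUpd (0, 0)).1 (arr.foldl negUpd (0, 0)).2
      = (fl.foldl stepN ((0 : Int), (0 : Int))).1 := by rw [← hf]
  have h2 : max (arr.foldl negUpd (0, 0)).1 (arr.foldl negUpd (0, 0)).2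
      = (fl.foldl stepN ((0 : Int), (0 : Int))).2 := by rw [← hf]
  rw [mul_min_max, h1, h2]
  have hfold : fl.foldl stepN ((0 : Int), (0 : Int)) = neg.foldl stepN ((0 : Int), (0 : Int)) :=
    (List.Perm.foldl_eq (rcomm := ⟨fun s x y => stepN_comm s x y⟩) hperm ((0 : Int), (0 : Int))).symm
  rw [hfold]
  exact stepN_sorted neg
    (fun y hy => by
      have hyfl : y ∈ fl := hperm.mem_iff.mp hy
      have := List.of_mem_filter hyfl
      simpa using this)
    (PySem.List.sorted_pairwise fl (fun x => x))

-- ===== VERDICT (by name: the statement is the Claim_ definition above) =====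
theorem prob4_spec : Claim_equal_prob4 := by
  intro arr _
  unfold Spec_prob4 prob4 prob4_alt
  rw [PySem.List.foldl_prod_mk posUpd negUpd arr (0, 0) (0, 0)]
  simp only []
  rw [pos_side arr, neg_side arr]
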